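-- pv_equiv track=rewrite | github.com/Levitate-Git/g-petto-commandGenerator | Smoothing_Modules/d1_smoothing.py | zero_end_velocities
-- ===== SOURCE A (Python) =====
-- def zero_end_velocities(zs):
--     """
--         Determining the points where end_effector change direction in solo motor case.
--         We need this frame numbers in order to assign end velocities of previous frames to zero.
--
--         Parameters:
--         -----------
--         zs : rope length values
--
--         Return:
--         ------
--         zero_end_velocity_frames : list of frames with zero end velocity.
--     """
--
--     directions = ["s"]
--     for i in range(1,len(zs)):
--         if zs[i]-zs[i-1] > 0:
--             direction = "d" # Means prop is moving downward.
--         elif zs[i]-zs[i-1] < 0: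
--             direction = "u" # Means prop is moving upward.
--         else:
--             direction = "s" # Means prop is stopping.
--         directions.append(direction)
--
--     zero_end_velocity_frames = []
--     for i in range(len(directions)-1):
--         # If directions does not equal it means motor is changing direction.
--         if directions[i] != directions[i+1]:
--             zero_end_velocity_frames.append(i)
--
--     return zero_end_velocity_frames
-- ===== SOURCE B (Python) =====
-- def zero_end_velocities(zs):
--     # A frame i marks a direction change iff the step into frame i and the step
--     # out of frame i have different signs (frame 0's incoming step counts as 0).
--     # Signs differ exactly when the product of the two steps is <= 0 and the
--     # steps are not both zero -- a purely arithmetic test, no direction labels.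
--     out = []
--     for i in range(len(zs) - 1):
--         p = zs[i] - zs[i - 1] if i > 0 else 0
--         q = zs[i + 1] - zs[i]
--         if p * q <= 0 and (p != 0 or q != 0):
--             out.append(i)
--     return out
-- ===== Notes on version B (the rewrite author's own statement) =====
-- stated objective: alternative
-- what changed: B never forms direction labels: it tests each frame directly with the arithmetic sign-change criterion 'product of incoming and outgoing step is <= 0 and the steps are not both zero', instead of A's two passes that materialize a list of direction strings and then scan adjacent entries for inequality.
import Mathlib
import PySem

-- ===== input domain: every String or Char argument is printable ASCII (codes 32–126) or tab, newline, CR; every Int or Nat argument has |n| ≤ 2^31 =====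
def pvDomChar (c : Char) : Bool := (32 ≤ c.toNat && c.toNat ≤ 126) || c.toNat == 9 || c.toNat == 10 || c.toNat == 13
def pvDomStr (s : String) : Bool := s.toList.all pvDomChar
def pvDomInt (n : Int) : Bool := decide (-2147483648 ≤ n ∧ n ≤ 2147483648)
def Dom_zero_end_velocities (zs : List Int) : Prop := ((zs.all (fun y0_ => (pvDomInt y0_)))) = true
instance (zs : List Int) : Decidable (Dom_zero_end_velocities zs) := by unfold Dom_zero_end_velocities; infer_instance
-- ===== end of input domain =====

-- B drops A's direction labels entirely: each frame is tested with the arithmetic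
-- sign-change criterion "incoming step * outgoing step <= 0 and not both zero"
-- (objective: alternative; same asymptotic cost).

-- ===== PORT A =====
-- first loop: build the full directions list; second loop: scan adjacent entries
def zero_end_velocities (zs : List Int) : List Int :=
  let directions : List String :=
    (PySem.List.pyRange 1 (zs.length : Int) 1).foldl
      (fun acc i =>
        acc ++ [if PySem.List.pyGetD zs i 0 - PySem.List.pyGetD zs (i-1) 0 > 0 then "d"
                else if PySem.List.pyGetD zs i 0 - PySem.List.pyGetD zs (i-1) 0 < 0 then "u"
                else "s"]) ["s"]
  (PySem.List.pyRange 0 ((directions.length : Int) - 1) 1).foldl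
    (fun acc i =>
      if PySem.List.pyGetD directions i "" ≠ PySem.List.pyGetD directions (i+1) "" then acc ++ [i]
      else acc) []

-- ===== PORT B =====
-- stateless loop over frames; p = step into frame i (0 at frame 0), q = step out of it
def zero_end_velocities_alt (zs : List Int) : List Int :=
  (PySem.List.pyRange 0 ((zs.length : Int) - 1) 1).foldl
    (fun out i =>
      let p := if i > 0 then PySem.List.pyGetD zs i 0 - PySem.List.pyGetD zs (i-1) 0 else 0
      let q := PySem.List.pyGetD zs (i+1) 0 - PySem.List.pyGetD zs i 0
      if p * q ≤ 0 ∧ (p ≠ 0 ∨ q ≠ 0) then out ++ [i] else out) []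

-- ===== PRECONDITION & SPEC =====
def Spec_zero_end_velocities (zs : List Int) (out : List Int) : Prop := out = zero_end_velocities_alt zs
instance (zs : List Int) (out : List Int) : Decidable (Spec_zero_end_velocities zs out) := by unfold Spec_zero_end_velocities; infer_instance

-- ===== CLAIM =====
def Claim_equal_zero_end_velocities : Prop := ∀ (zs : List Int), Dom_zero_end_velocities zs → Spec_zero_end_velocities zs (zero_end_velocities zs)

-- ===== LEMMAS AND PROOFS =====

-- direction label of a step (A's classification)
def pvDir (d : Int) : String := if d > 0 then "d" else if d < 0 then "u" else "s"

-- A's first loop produces exactly the labels of the consecutive differences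
theorem pvA_dirs (zs : List Int) :
    (PySem.List.pyRange 1 (zs.length : Int) 1).map
      (fun i => if PySem.List.pyGetD zs i 0 - PySem.List.pyGetD zs (i-1) 0 > 0 then "d"
                else if PySem.List.pyGetD zs i 0 - PySem.List.pyGetD zs (i-1) 0 < 0 then "u"
                else "s")
    = (zs.zip (zs.drop 1)).map (fun p => pvDir (p.2 - p.1)) := by
  apply List.ext_getElem
  · simp [PySem.List.length_pyRange_one]
  · intro k h1 h2
    simp only [List.getElem_map, PySem.List.getElem_pyRange_one, List.getElem_zip, List.getElem_drop]
    have hk : k + 1 < zs.length := by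
      simp [PySem.List.length_pyRange_one] at h1; omega
    have e1 : PySem.List.pyGetD zs (1 + (k : Int)) 0 = zs[k+1] := by
      have : (1 + (k : Int)) = ((k+1 : Nat) : Int) := by omega
      rw [this, PySem.List.pyGetD_natCast]
      simp [List.getD, List.getElem?_eq_getElem hk]
    have e2 : PySem.List.pyGetD zs (1 + (k : Int) - 1) 0 = zs[k] := by
      have : (1 + (k : Int) - 1) = ((k : Nat) : Int) := by omega
      rw [this, PySem.List.pyGetD_natCast]
      have hk' : k < zs.length := by omega
      simp [List.getD, List.getElem?_eq_getElem hk']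
    rw [e1, e2]
    have h3 : 1 + k = k + 1 := Nat.add_comm 1 k
    simp only [pvDir, h3]

-- B's arithmetic test is exactly "the two direction labels differ"
theorem pvDir_neg (r : Int) (h : r < 0) : pvDir r = "u" := by
  unfold pvDir; rw [if_neg (by omega), if_pos h]

theorem pvDir_zero : pvDir 0 = "s" := by
  unfold pvDir; norm_num

theorem pvDir_pos (r : Int) (h : 0 < r) : pvDir r = "d" := by
  unfold pvDir; rw [if_pos h]

-- B's arithmetic test is exactly "the two direction labels differ"
theorem pvSignTest (p q : Int) : (p * q ≤ 0 ∧ (p ≠ 0 ∨ q ≠ 0)) ↔ pvDir p ≠ pvDir q := by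
  rcases lt_trichotomy p 0 with hp | hp | hp <;>
    rcases lt_trichotomy q 0 with hq | hq | hq
  · rw [pvDir_neg p hp, pvDir_neg q hq]
    have := mul_pos_of_neg_of_neg hp hq
    simp; intro h; exact absurd this (by omega)
  · subst hq; rw [pvDir_neg p hp, pvDir_zero]
    simp [hp.ne]
  · rw [pvDir_neg p hp, pvDir_pos q hq]
    have := mul_neg_of_neg_of_pos hp hq
    simp [hp.ne, this.le]
  · subst hp; rw [pvDir_zero, pvDir_neg q hq]
    simp [hq.ne]
  · subst hp; subst hq; simp [pvDir_zero]
  · subst hp; rw [pvDir_zero, pvDir_pos q hq]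
    simp [hq.ne']
  · rw [pvDir_pos p hp, pvDir_neg q hq]
    have := mul_neg_of_pos_of_neg hp hq
    simp [hp.ne', this.le]
  · subst hq; rw [pvDir_pos p hp, pvDir_zero]
    simp [hp.ne']
  · rw [pvDir_pos p hp, pvDir_pos q hq]
    have := mul_pos hp hq
    simp; intro h; exact absurd this (by omega)

-- ===== VERDICT =====
theorem zero_end_velocities_spec : Claim_equal_zero_end_velocities := by
  intro zs _
  unfold Spec_zero_end_velocities zero_end_velocities zero_end_velocities_alt
  rw [PySem.List.foldl_append_singleton_eq_map, pvA_dirs]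
  simp only [List.singleton_append]
  cases zs with
  | nil => decide
  | cons z tl =>
    set zs := z :: tl with hzs
    have hn : 0 < zs.length := by simp [hzs]
    set M := (zs.zip (zs.drop 1)).map (fun p => pvDir (p.2 - p.1)) with hM
    have hMlen : M.length = zs.length - 1 := by
      simp [hM, hzs]
    have hbound : ((("s" :: M).length : Int) - 1) = (zs.length : Int) - 1 := by
      simp [hMlen]; omega
    rw [hbound]
    apply (PySem.List.foldl_congr_mem _ _ _ _ ?_).symm
    intro acc i hi
    rw [PySem.List.mem_pyRange_one] at hi
    obtain ⟨h0, h1⟩ := hi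
    obtain ⟨k, rfl⟩ : ∃ k : Nat, i = (k : Int) := ⟨i.toNat, (Int.toNat_of_nonneg h0).symm⟩
    have hk : k < zs.length - 1 := by omega
    -- element access in zs
    have hget : ∀ j : Nat, (hj : j < zs.length) → PySem.List.pyGetD zs (j : Int) 0 = zs[j] := by
      intro j hj
      rw [PySem.List.pyGetD_natCast]
      simp [List.getD, List.getElem?_eq_getElem hj]
    -- element access in the directions list
    have hD : ∀ j : Nat, (hj : j < zs.length - 1) →
        PySem.List.pyGetD ("s" :: M) ((j : Int) + 1) "" = pvDir (zs[j+1] - zs[j]) := by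
      intro j hj
      have : ((j : Int) + 1) = ((j + 1 : Nat) : Int) := by push_cast; ring
      rw [this, PySem.List.pyGetD_natCast]
      have hjM : j < M.length := by omega
      have : ("s" :: M).getD (j+1) "" = M[j] := by
        simp [List.getD, List.getElem?_eq_getElem hjM]
      rw [this]
      simp only [hM, List.getElem_map, List.getElem_zip, List.getElem_drop]
      have e : 1 + j = j + 1 := Nat.add_comm 1 j
      simp only [e]
    -- the two loop bodies agree at frame k
    have hq : PySem.List.pyGetD zs ((k : Int) + 1) 0 - PySem.List.pyGetD zs (k : Int) 0
        = zs[k+1] - zs[k] := by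
      have e1 : ((k : Int) + 1) = ((k + 1 : Nat) : Int) := by push_cast; ring
      rw [e1, hget (k+1) (by omega), hget k (by omega)]
    cases k with
    | zero =>
      have hD0 : PySem.List.pyGetD ("s" :: M) (((0:Nat)) : Int) "" = "s" := by
        rw [PySem.List.pyGetD_natCast]; simp [List.getD]
      have hD1 := hD 0 hk
      have key := pvSignTest 0 (zs[0+1] - zs[0])
      rw [pvDir_zero] at key
      rw [if_neg (show ¬ (((0:Nat)) : Int) > 0 by norm_num)]
      rw [hq]
      simp only [hD0, hD1]
      by_cases hc : "s" ≠ pvDir (zs[0+1] - zs[0])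
      · rw [if_pos (key.mpr hc), if_pos hc]
      · rw [if_neg (fun hx => hc (key.mp hx)), if_neg hc]
    | succ m =>
      have hp : PySem.List.pyGetD zs ((m+1 : Nat) : Int) 0 - PySem.List.pyGetD zs (((m+1 : Nat) : Int) - 1) 0
          = zs[m+1] - zs[m] := by
        have e2 : (((m+1 : Nat) : Int) - 1) = ((m : Nat) : Int) := by push_cast; ring
        rw [e2, hget (m+1) (by omega), hget m (by omega)]
      have hDm : PySem.List.pyGetD ("s" :: M) ((m+1 : Nat) : Int) "" = pvDir (zs[m+1] - zs[m]) := by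
        have e3 : ((m+1 : Nat) : Int) = ((m : Int) + 1) := by push_cast; ring
        rw [e3]; exact hD m (by omega)
      have hDm1 := hD (m+1) hk
      have key := pvSignTest (zs[m+1] - zs[m]) (zs[m+1+1] - zs[m+1])
      have hpos : ((m+1 : Nat) : Int) > 0 := by positivity
      rw [if_pos hpos, hp, hq]
      simp only [hDm, hDm1]
      by_cases hc : pvDir (zs[m+1] - zs[m]) ≠ pvDir (zs[m+1+1] - zs[m+1])
      · rw [if_pos (key.mpr hc), if_pos hc]
      · rw [if_neg (fun hx => hc (key.mp hx)), if_neg hc]
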